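-- pv_equiv track=rewrite | github.com/tobeannouncd/AdventOfCode | 2018/day2.py | part1
-- ===== SOURCE A (Python) =====
-- from collections import Counter
--
-- def part1(candidates, debug: bool):
--     cnt2, cnt3 = 0, 0
--     for c in candidates:
--         cc = Counter(c)
--         if 2 in cc.values():
--             cnt2 += 1
--         if 3 in cc.values():
--             cnt3 += 1
--     return cnt2*cnt3
-- ===== SOURCE B (Python) =====
-- def _run_lengths(s):
--     # lengths of maximal runs of equal adjacent elements
--     if not s:
--         return []
--     run = 1
--     while run < len(s) and s[run] == s[0]:
--         run += 1
--     return [run] + _run_lengths(s[run:])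
--
-- def part1(candidates, debug: bool):
--     cnt2, cnt3 = 0, 0
--     for c in candidates:
--         runs = _run_lengths(sorted(c))
--         if 2 in runs:
--             cnt2 += 1
--         if 3 in runs:
--             cnt3 += 1
--     return cnt2*cnt3
-- ===== Notes on version B (the rewrite author's own statement) =====
-- stated objective: alternative
-- what changed: Per string, the letter multiplicities are obtained by sorting the characters and scanning maximal-run lengths instead of building a Counter hash map; a run of length 2/3 in the sorted string is exactly a letter occurring 2/3 times.
import Mathlib
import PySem

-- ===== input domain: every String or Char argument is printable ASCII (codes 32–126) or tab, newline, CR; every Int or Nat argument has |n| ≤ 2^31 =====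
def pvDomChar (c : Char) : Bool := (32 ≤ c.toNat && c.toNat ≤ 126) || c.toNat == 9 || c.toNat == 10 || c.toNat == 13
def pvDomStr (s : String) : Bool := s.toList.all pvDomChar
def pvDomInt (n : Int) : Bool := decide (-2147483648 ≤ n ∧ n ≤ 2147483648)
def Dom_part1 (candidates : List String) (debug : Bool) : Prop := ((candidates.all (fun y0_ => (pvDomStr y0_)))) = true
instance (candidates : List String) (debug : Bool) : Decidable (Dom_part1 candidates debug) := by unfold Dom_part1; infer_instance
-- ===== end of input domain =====

-- B obtains each string's letter multiplicities by sorting the characters and scanning maximal-run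
-- lengths, instead of A's Counter hash-map; an alternative algorithm of similar cost.


-- ===== PORT A =====
def part1 (candidates : List String) (debug : Bool) : Int :=
  let s := candidates.foldl (fun s c =>
    let cc := PySem.Dict.counter c.toList
    let s := if cc.values.contains (2 : Int) then (s.1 + 1, s.2) else s
    let s := if cc.values.contains (3 : Int) then (s.1, s.2 + 1) else s
    s) ((0 : Int), (0 : Int))
  s.1 * s.2

-- ===== PORT B =====
-- run = 1 + length of the maximal prefix of xs equal to x (Source B's inner while loop);
-- s[run:] is then exactly the dropWhile remainder.
def runLengths : List Char → List Int
  | [] => []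
  | x :: xs =>
      ((1 + (xs.takeWhile (fun y => y == x)).length : Nat) : Int)
        :: runLengths (xs.dropWhile (fun y => y == x))
termination_by l => l.length
decreasing_by
  simp only [List.length_cons]
  exact Nat.lt_succ_of_le (List.length_dropWhile_le _ _)

def part1_alt (candidates : List String) (debug : Bool) : Int :=
  let s := candidates.foldl (fun s c =>
    let runs := runLengths (PySem.List.sorted c.toList (fun y => y) false)
    let s := if runs.contains (2 : Int) then (s.1 + 1, s.2) else s
    let s := if runs.contains (3 : Int) then (s.1, s.2 + 1) else s
    s) ((0 : Int), (0 : Int))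
  s.1 * s.2

-- ===== PRECONDITION & SPEC =====
def Spec_part1 (candidates : List String) (debug : Bool) (out : Int) : Prop := out = part1_alt candidates debug
instance (candidates : List String) (debug : Bool) (out : Int) : Decidable (Spec_part1 candidates debug out) := by unfold Spec_part1; infer_instance

-- ===== CLAIM (what is proved, stated in full; the proofs are below) =====
def Claim_equal_part1 : Prop := ∀ (candidates : List String) (debug : Bool), Dom_part1 candidates debug → Spec_part1 candidates debug (part1 candidates debug)

-- ===== LEMMAS AND PROOFS =====

-- the two-counter loop, for any per-element predicates
theorem pv_fold_pair (p q : String → Bool) (l : List String) (a b : Int) :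
    (l.foldl (fun s c =>
      let s := if p c then (s.1 + 1, s.2) else s
      let s := if q c then (s.1, s.2 + 1) else s
      s) (a, b)) = (a + (l.countP p : Int), b + (l.countP q : Int)) := by
  induction l generalizing a b with
  | nil => simp
  | cons x xs ih =>
    simp only [List.foldl_cons, List.countP_cons]
    by_cases hp : p x <;> by_cases hq : q x <;>
      simp [hp, hq, ih] <;> push_cast <;> ring_nf <;> trivial

-- A-side: k is a value of Counter(l) iff some element of l has count k
theorem pv_counter_values (l : List Char) (k : Int) :
    (PySem.Dict.counter l).values.contains k = true ↔ ∃ ch ∈ l, (l.count ch : Int) = k := by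
  have h := PySem.Dict.items_counter (xs := l)
  have hv : (PySem.Dict.counter l).values
      = (PySem.Set.ofList l).map (fun ch => (l.count ch : Int)) := by
    simp only [PySem.Dict.values, h, List.map_map, Function.comp_def]
  simp only [hv, List.contains_eq_mem, decide_eq_true_eq, List.mem_map]
  constructor
  · rintro ⟨ch, hm, hk⟩; exact ⟨ch, (PySem.Set.mem_ofList _ _).1 hm, hk⟩
  · rintro ⟨ch, hm, hk⟩; exact ⟨ch, (PySem.Set.mem_ofList _ _).2 hm, hk⟩

-- everything after a dropWhile (== x) step of a sorted run is strictly greater than x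
theorem pv_dropWhile_gt (x : Char) (xs : List Char) (hpw : xs.Pairwise (· ≤ ·))
    (hle : ∀ y ∈ xs, x ≤ y) :
    ∀ y ∈ xs.dropWhile (fun y => y == x), x < y := by
  induction xs with
  | nil => intro y hy; simp [List.dropWhile] at hy
  | cons z zs ih =>
    intro y hy
    by_cases hz : (z == x) = true
    · simp only [List.dropWhile_cons, hz, if_true] at hy
      exact ih hpw.of_cons (fun w hw => hle w (List.mem_cons_of_mem _ hw)) y hy
    · simp only [List.dropWhile_cons, hz, if_false] at hy
      have hxz : x < z := lt_of_le_of_ne (hle z (List.mem_cons_self)) (by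
        intro h; exact hz (by simp [h]))
      rcases List.mem_cons.1 hy with rfl | hy'
      · exact hxz
      · exact lt_of_lt_of_le hxz ((List.pairwise_cons.1 hpw).1 y hy')

-- B-side core: on a sorted list, the run lengths are exactly the element counts
theorem pv_runLengths_spec (l : List Char) (hpw : l.Pairwise (· ≤ ·)) (k : Int) :
    (runLengths l).contains k = true ↔ ∃ ch ∈ l, (l.count ch : Int) = k := by
  induction l using runLengths.induct with
  | case1 => simp [runLengths]
  | case2 x xs ih =>
    have hle : ∀ y ∈ xs, x ≤ y := (List.pairwise_cons.1 hpw).1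
    have hpw' : xs.Pairwise (· ≤ ·) := hpw.of_cons
    set t := xs.takeWhile (fun y => y == x) with ht
    set d := xs.dropWhile (fun y => y == x) with hd
    have hsplit : xs = t ++ d := (List.takeWhile_append_dropWhile).symm
    have htx : ∀ y ∈ t, y = x := by
      intro y hy
      have := List.mem_takeWhile_imp hy
      simpa using this
    have hdgt : ∀ y ∈ d, x < y := pv_dropWhile_gt x xs hpw' hle
    have hdpw : d.Pairwise (· ≤ ·) := hpw'.sublist (List.dropWhile_sublist _)
    have hcount_t : ∀ ch : Char, t.count ch = if ch = x then t.length else 0 := by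
      intro ch
      split_ifs with hc
      · subst hc
        exact List.count_eq_length.2 (fun y hy => by simp [htx y hy])
      · exact List.count_eq_zero.2 (fun hmem => hc (htx ch hmem))
    have hxd : x ∉ d := fun hmem => lt_irrefl x (hdgt x hmem)
    have hcx : (x :: xs).count x = 1 + t.length := by
      rw [hsplit]
      simp [List.count_cons, List.count_append, hcount_t x,
        List.count_eq_zero.2 hxd, Nat.add_comm]
    have hcne : ∀ ch : Char, ch ≠ x → (x :: xs).count ch = d.count ch := by
      intro ch hne
      rw [hsplit]
      simp [List.count_cons, List.count_append, hcount_t ch, hne, Ne.symm hne]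
    rw [runLengths]
    simp only [← ht, ← hd]
    simp only [List.contains_cons, Bool.or_eq_true, beq_iff_eq]
    constructor
    · rintro (hk | hk)
      · exact ⟨x, List.mem_cons_self, by rw [hcx]; push_cast; omega⟩
      · rcases (ih hdpw).1 hk with ⟨ch, hm, hc⟩
        have hne : ch ≠ x := fun h => hxd (h ▸ hm)
        refine ⟨ch, List.mem_cons_of_mem _ (hsplit ▸ List.mem_append_right t hm), ?_⟩
        rw [hcne ch hne]; exact hc
    · rintro ⟨ch, hm, hc⟩
      by_cases hne : ch = x
      · left; subst hne; rw [hcx] at hc; push_cast at hc ⊢; omega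
      · right
        have hmxs : ch ∈ xs := by
          rcases List.mem_cons.1 hm with h | h
          · exact absurd h hne
          · exact h
        have hmd : ch ∈ d := by
          rcases List.mem_append.1 (hsplit ▸ hmxs) with h | h
          · exact absurd (htx ch h) hne
          · exact h
        have : d.count ch = (x :: xs).count ch := (hcne ch hne).symm
        exact (ih hdpw).2 ⟨ch, hmd, by rw [hcne ch hne] at hc; exact hc⟩

-- per string: Counter-values test = sorted-run-lengths test
theorem pv_string_eq (c : String) (k : Int) :
    (PySem.Dict.counter c.toList).values.contains k
      = (runLengths (PySem.List.sorted c.toList (fun y => y) false)).contains k := by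
  set l := c.toList
  set l' := PySem.List.sorted l (fun y => y) false with hl'
  have hperm : l'.Perm l := PySem.List.sorted_perm l (fun y => y) false
  have hpw : l'.Pairwise (· ≤ ·) := by
    have := PySem.List.sorted_pairwise (xs := l) (key := fun y => y)
    simpa using this
  rw [Bool.eq_iff_iff, pv_counter_values, pv_runLengths_spec l' hpw k]
  constructor
  · rintro ⟨ch, hm, hc⟩
    exact ⟨ch, hperm.mem_iff.2 hm, by rw [hperm.count_eq]; exact hc⟩
  · rintro ⟨ch, hm, hc⟩
    exact ⟨ch, hperm.mem_iff.1 hm, by rw [← hperm.count_eq]; exact hc⟩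

-- ===== VERDICT (by name: the statement is the Claim_ definition above) =====
theorem part1_spec : Claim_equal_part1 := by
  intro candidates debug _
  unfold Spec_part1 part1 part1_alt
  simp only [pv_fold_pair]
  have h2 : candidates.countP (fun c => (PySem.Dict.counter c.toList).values.contains (2 : Int))
      = candidates.countP (fun c => (runLengths (PySem.List.sorted c.toList (fun y => y) false)).contains (2 : Int)) :=
    List.countP_congr (fun c _ => by rw [pv_string_eq])
  have h3 : candidates.countP (fun c => (PySem.Dict.counter c.toList).values.contains (3 : Int))
      = candidates.countP (fun c => (runLengths (PySem.List.sorted c.toList (fun y => y) false)).contains (3 : Int)) :=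
    List.countP_congr (fun c _ => by rw [pv_string_eq])
  simp only [h2, h3]
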